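-- pv_equiv track=rewrite | github.com/cbeiraod/I2C-GUI2 | src/i2c_gui2/functions.py | word_list_to_bytes
-- ===== SOURCE A (Python) =====
-- def word_list_to_bytes(word_list: list[int], bytelength: int = 1, endianness: str = 'big'):
--     if bytelength == 1:
--         byte_list = word_list
--     else:
--         byte_list = []
--         if endianness == 'big':
--             for word in word_list:
--                 for byte_offset in range(bytelength):
--                     byte_list += [(word >> ((bytelength - 1 - byte_offset) * 8)) & 0xFF]
--         else:  # if endianness == 'little':
--             for word in word_list:
--                 for byte_offset in range(bytelength):
--                     byte_list += [(word >> (byte_offset * 8)) & 0xFF]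
--
--     return byte_list
-- ===== SOURCE B (Python) =====
-- def word_list_to_bytes(word_list: list[int], bytelength: int = 1, endianness: str = 'big'):
--     if bytelength == 1:
--         return word_list
--     if bytelength <= 0:
--         return []
--     size = 1 << (8 * bytelength)
--     # A treats any endianness other than 'big' as little
--     order = 'big' if endianness == 'big' else 'little'
--     out = []
--     for word in word_list:
--         out.extend((word % size).to_bytes(bytelength, order))
--     return out
-- ===== Notes on version B (the rewrite author's own statement) =====
-- stated objective: idiomatic
-- what changed: A extracts every byte with explicit endianness-specific shift-and-mask nested loops appending one-element lists; B reduces each word modulo 2^(8*bytelength) and converts it with the built-in int.to_bytes, extending the output with the per-word byte string.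
import Mathlib
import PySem

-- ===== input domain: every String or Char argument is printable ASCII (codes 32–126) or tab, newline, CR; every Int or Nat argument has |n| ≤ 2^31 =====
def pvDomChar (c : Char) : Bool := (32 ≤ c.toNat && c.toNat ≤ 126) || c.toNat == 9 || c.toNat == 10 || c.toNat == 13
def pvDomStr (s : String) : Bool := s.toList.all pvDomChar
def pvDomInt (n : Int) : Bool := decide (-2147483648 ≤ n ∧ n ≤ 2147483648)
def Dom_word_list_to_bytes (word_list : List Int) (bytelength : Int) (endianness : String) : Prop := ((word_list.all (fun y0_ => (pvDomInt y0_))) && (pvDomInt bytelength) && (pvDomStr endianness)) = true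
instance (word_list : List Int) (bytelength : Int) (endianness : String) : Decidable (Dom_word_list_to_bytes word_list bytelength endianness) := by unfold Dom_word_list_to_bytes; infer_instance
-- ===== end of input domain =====

-- B replaces A's explicit endianness-specific shift-and-mask nested loops by reducing each word
-- modulo 2^(8*bytelength) and converting it with int.to_bytes (objective: idiomatic; measured faster in a timing run).

-- ===== PORT A =====
-- Shift amounts (bytelength-1-byte_offset)*8 resp. byte_offset*8 are nonnegative for every
-- byte_offset in range(bytelength), so '.toNat' on them is exact (Python '>>' with count k ≥ 0 is '>>> (k : Nat)').
def word_list_to_bytes (word_list : List Int) (bytelength : Int) (endianness : String) : List Int :=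
  if bytelength == 1 then
    word_list
  else if endianness == "big" then
    word_list.foldl (fun byte_list (word : Int) =>
      (PySem.List.pyRange 0 bytelength 1).foldl (fun bl byte_offset =>
        bl ++ [PySem.Int.band (word >>> ((bytelength - 1 - byte_offset) * 8).toNat) 0xFF]) byte_list) []
  else
    word_list.foldl (fun byte_list (word : Int) =>
      (PySem.List.pyRange 0 bytelength 1).foldl (fun bl byte_offset =>
        bl ++ [PySem.Int.band (word >>> (byte_offset * 8).toNat) 0xFF]) byte_list) []

-- ===== PORT B =====
-- Hand port of Python's int.to_bytes(k, 'big') / int.to_bytes(k, 'little'): exact for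
-- 0 ≤ x < 2^(8k), which holds for the argument (w % 2^(8*bytelength)) B passes (Lean's
-- Int `/` `%` are Euclidean = Python's floor for the positive divisors used here).
def pvToBytesBig : Nat → Int → List Int
  | 0, _ => []
  | k + 1, x => pvToBytesBig k (x / 256) ++ [x % 256]

def pvToBytesLittle : Nat → Int → List Int
  | 0, _ => []
  | k + 1, x => (x % 256) :: pvToBytesLittle k (x / 256)

def word_list_to_bytes_alt (word_list : List Int) (bytelength : Int) (endianness : String) : List Int :=
  if bytelength == 1 then
    word_list
  else if bytelength ≤ 0 then
    []
  else
    word_list.foldl (fun out (w : Int) =>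
      out ++ (if endianness == "big" then
                pvToBytesBig bytelength.toNat (w % (2 ^ (8 * bytelength.toNat)))
              else
                pvToBytesLittle bytelength.toNat (w % (2 ^ (8 * bytelength.toNat))))) []

-- ===== PRECONDITION & SPEC =====
def Spec_word_list_to_bytes (word_list : List Int) (bytelength : Int) (endianness : String) (out : List Int) : Prop := out = word_list_to_bytes_alt word_list bytelength endianness
instance (word_list : List Int) (bytelength : Int) (endianness : String) (out : List Int) : Decidable (Spec_word_list_to_bytes word_list bytelength endianness out) := by unfold Spec_word_list_to_bytes; infer_instance

-- ===== CLAIM (what is proved, stated in full; the proofs are below) =====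
def Claim_equal_word_list_to_bytes : Prop := ∀ (word_list : List Int) (bytelength : Int) (endianness : String), Dom_word_list_to_bytes word_list bytelength endianness → Spec_word_list_to_bytes word_list bytelength endianness (word_list_to_bytes word_list bytelength endianness)

-- ===== LEMMAS AND PROOFS =====

-- Python's  a & 0xFF  is  a % 256  (also for negative a).
theorem pv_band_255 (a : Int) : PySem.Int.band a 255 = a % 256 := by
  unfold PySem.Int.band
  by_cases ha : 0 ≤ a
  · simp only [ha, if_true, show (0:Int) ≤ 255 by norm_num, if_true]
    have h : a.toNat &&& (255:Int).toNat = a.toNat % 256 := by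
      have := Nat.and_two_pow_sub_one_eq_mod a.toNat 8
      norm_num at this ⊢
      exact this
    rw [h]
    omega
  · simp only [ha, if_false, show (0:Int) ≤ 255 by norm_num, if_true]
    have h : (255:Int).toNat &&& (-a - 1).toNat = (-a - 1).toNat % 256 := by
      rw [Nat.and_comm]
      have := Nat.and_two_pow_sub_one_eq_mod (-a - 1).toNat 8
      norm_num at this ⊢
      exact this
    rw [h]
    omega

-- A's little-endian byte at offset i, as arithmetic.
theorem pv_byte_arith (w : Int) (i : Nat) :
    PySem.Int.band (w >>> (8 * i : Nat)) 255 = (w / 2 ^ (8 * i)) % 256 := by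
  rw [pv_band_255, Int.shiftRight_eq_div_pow]
  norm_num

-- B's little conversion is the little-endian byte map.
theorem pv_little_map (k : Nat) : ∀ (x : Int),
    pvToBytesLittle k x = (List.range k).map (fun i => (x / 2 ^ (8 * i)) % 256) := by
  induction k with
  | zero => intro x; rfl
  | succ m ih =>
    intro x
    rw [List.range_succ_eq_map]
    simp only [pvToBytesLittle, List.map_cons, List.map_map, ih (x / 256)]
    congr 1
    · norm_num
    · apply List.map_congr_left
      intro i _
      simp only [Function.comp]
      have h256 : (256 : Int) = 2 ^ 8 := by norm_num
      have he : 8 + 8 * i = 8 * (i + 1) := by omega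
      rw [h256, Int.ediv_ediv_of_nonneg (by positivity), ← pow_add, he]

-- B's big conversion is the reverse of the little one.
theorem pv_big_rev (k : Nat) : ∀ (x : Int), pvToBytesBig k x = (pvToBytesLittle k x).reverse := by
  induction k with
  | zero => intro x; rfl
  | succ m ih =>
    intro x
    simp [pvToBytesBig, pvToBytesLittle, ih (x / 256)]

-- Reducing w modulo 2^(8k) does not change bytes below offset k.
theorem pv_mod_wash (w : Int) (k i : Nat) (hik : i < k) :
    ((w % 2 ^ (8 * k)) / 2 ^ (8 * i)) % 256 = (w / 2 ^ (8 * i)) % 256 := by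
  set r := w % 2 ^ (8 * k) with hr
  set q := w / 2 ^ (8 * k) with hq
  have hdecomp : w = r + 2 ^ (8 * k) * q := by
    rw [hr, hq]
    exact (Int.emod_add_mul_ediv w _).symm
  have hsplit : (2 : Int) ^ (8 * k) = 2 ^ (8 * (k - i - 1)) * 256 * 2 ^ (8 * i) := by
    have : (256 : Int) = 2 ^ 8 := by norm_num
    rw [this, ← pow_add, ← pow_add]
    congr 1
    omega
  have hdiv : w / 2 ^ (8 * i) = r / 2 ^ (8 * i) + q * (2 ^ (8 * (k - i - 1)) * 256) := by
    conv_lhs => rw [hdecomp, hsplit]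
    have hassoc : r + 2 ^ (8 * (k - i - 1)) * 256 * 2 ^ (8 * i) * q
        = r + q * (2 ^ (8 * (k - i - 1)) * 256) * 2 ^ (8 * i) := by ring
    rw [hassoc]
    exact Int.add_mul_ediv_right r (q * (2 ^ (8 * (k - i - 1)) * 256))
      (show (2:Int) ^ (8 * i) ≠ 0 by positivity)
  rw [hdiv]
  have : q * (2 ^ (8 * (k - i - 1)) * 256) = 256 * (q * 2 ^ (8 * (k - i - 1))) := by ring
  rw [this, Int.add_mul_emod_self_left]

-- the little-endian byte map reversed is the big-endian byte map
theorem pv_rev_map_range {α : Type} (N : Nat) (f : Nat → α) :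
    ((List.range N).map f).reverse = (List.range N).map (fun k => f (N - 1 - k)) := by
  apply List.ext_getElem
  · simp
  · intro i h1 h2
    simp only [List.length_reverse, List.length_map, List.length_range] at h1 h2
    simp only [List.getElem_reverse, List.getElem_map, List.getElem_range, List.length_map,
      List.length_range]

-- A's inner little-endian loop as a byte map.
theorem pv_little_word (n : Int) (w : Int) (c : List Int) :
    (PySem.List.pyRange 0 n 1).foldl (fun bl byte_offset =>
        bl ++ [PySem.Int.band (w >>> (byte_offset * 8).toNat) 0xFF]) c
    = c ++ (List.range n.toNat).map (fun i => PySem.Int.band (w >>> (8 * i : Nat)) 0xFF) := by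
  rw [PySem.List.foldl_append_singleton_eq_map, PySem.List.pyRange_one]
  simp only [Int.sub_zero, List.map_map]
  congr 1
  apply List.map_congr_left
  intro k _
  simp only [Function.comp]
  have h : ((0 + (k : Int)) * 8).toNat = 8 * k := by omega
  rw [h, Int.shiftRight_natCast_right]

-- A's inner big-endian loop as the reversed byte map.
theorem pv_big_word (n : Int) (w : Int) (c : List Int) :
    (PySem.List.pyRange 0 n 1).foldl (fun bl byte_offset =>
        bl ++ [PySem.Int.band (w >>> ((n - 1 - byte_offset) * 8).toNat) 0xFF]) c
    = c ++ ((List.range n.toNat).map (fun i => PySem.Int.band (w >>> (8 * i : Nat)) 0xFF)).reverse := by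
  rw [PySem.List.foldl_append_singleton_eq_map, PySem.List.pyRange_one, pv_rev_map_range]
  simp only [Int.sub_zero, List.map_map]
  congr 1
  apply List.map_congr_left
  intro k hk
  simp only [Function.comp]
  simp only [List.mem_range] at hk
  have h : ((n - 1 - (0 + (k : Int))) * 8).toNat = 8 * (n.toNat - 1 - k) := by omega
  rw [h]

-- Per word: A's little byte map equals B's little to_bytes conversion.
theorem pv_word_little (n : Int) (w : Int) :
    (List.range n.toNat).map (fun i => PySem.Int.band (w >>> (8 * i : Nat)) 0xFF)
    = pvToBytesLittle n.toNat (w % (2 ^ (8 * n.toNat))) := by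
  rw [pv_little_map]
  apply List.map_congr_left
  intro i hi
  simp only [List.mem_range] at hi
  rw [pv_byte_arith, pv_mod_wash w n.toNat i hi]

theorem pv_outer_big (n : Int) : ∀ (l acc : List Int),
    l.foldl (fun byte_list (word : Int) =>
      (PySem.List.pyRange 0 n 1).foldl (fun bl byte_offset =>
        bl ++ [PySem.Int.band (word >>> ((n - 1 - byte_offset) * 8).toNat) 0xFF]) byte_list) acc
    = l.foldl (fun out (w : Int) => out ++ pvToBytesBig n.toNat (w % (2 ^ (8 * n.toNat)))) acc := by
  intro l
  induction l with
  | nil => intro acc; rfl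
  | cons w t ih =>
    intro acc
    simp only [List.foldl_cons]
    rw [pv_big_word, ih, pv_big_rev, ← pv_word_little n w]

theorem pv_outer_little (n : Int) : ∀ (l acc : List Int),
    l.foldl (fun byte_list (word : Int) =>
      (PySem.List.pyRange 0 n 1).foldl (fun bl byte_offset =>
        bl ++ [PySem.Int.band (word >>> (byte_offset * 8).toNat) 0xFF]) byte_list) acc
    = l.foldl (fun out (w : Int) => out ++ pvToBytesLittle n.toNat (w % (2 ^ (8 * n.toNat)))) acc := by
  intro l
  induction l with
  | nil => intro acc; rfl
  | cons w t ih =>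
    intro acc
    simp only [List.foldl_cons]
    rw [pv_little_word, ih, ← pv_word_little n w]

-- ===== VERDICT (by name: the statement is the Claim_ definition above) =====
theorem word_list_to_bytes_spec : Claim_equal_word_list_to_bytes := by
  intro word_list bytelength endianness _
  unfold Spec_word_list_to_bytes word_list_to_bytes word_list_to_bytes_alt
  by_cases h1 : bytelength == 1
  · simp [h1]
  · simp only [h1, Bool.false_eq_true, if_false]
    have hb1 : bytelength ≠ 1 := by simpa using h1
    by_cases hle : bytelength ≤ 0
    · -- pyRange is empty, so A's inner loops add nothing and A returns []
      have hemp : PySem.List.pyRange 0 bytelength 1 = [] := by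
        rw [PySem.List.pyRange_one]
        have h0 : (bytelength - 0).toNat = 0 := by omega
        rw [h0]
        rfl
      simp only [hle, if_true, hemp, List.foldl_nil]
      by_cases he : endianness == "big" <;>
        simp [he, List.foldl_fixed]
    · simp only [hle, if_false]
      by_cases he : endianness == "big"
      · simp only [he, if_true]
        exact pv_outer_big bytelength word_list []
      · simp only [he, Bool.false_eq_true, if_false]
        exact pv_outer_little bytelength word_list []
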